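-- pv_equiv track=rewrite | github.com/alan-turing-institute/bio-Turing-Way | card_text.py | create_bullet_string
-- ===== SOURCE A (Python) =====
-- def create_bullet_string(titlelist,file_list):
--     toc_string = ""
--     for counter, title in enumerate(titlelist):
--         if counter >= 3:
--             toc_string = toc_string + "- And more! \n"
--             break
--         # If we create "editions", these may need to be <a href=''> type links
--         toc_string = toc_string + "- [" + title +"](" + file_list[counter] + ")\n"
--     return toc_string
-- ===== SOURCE B (Python) =====
-- def create_bullet_string(titlelist, file_list):
--     # Recursive countdown: consume both lists head-first with a budget of 3;
--     # a nonempty remainder once the budget is spent becomes the overflow marker.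
--     def go(titles, files, budget):
--         if not titles:
--             return ""
--         if budget == 0:
--             return "- And more! \n"
--         return "- [" + titles[0] + "](" + files[0] + ")\n" + go(titles[1:], files[1:], budget - 1)
--     return go(titlelist, file_list, 3)
-- ===== Notes on version B (the rewrite author's own statement) =====
-- stated objective: alternative
-- what changed: Replaces A's iterative enumerate-and-break loop with a left accumulator and counter-vs-3 test by a recursive head/tail decomposition consuming both lists in step with a countdown budget, building the string back-to-front with no indexing arithmetic.
import Mathlib
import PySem

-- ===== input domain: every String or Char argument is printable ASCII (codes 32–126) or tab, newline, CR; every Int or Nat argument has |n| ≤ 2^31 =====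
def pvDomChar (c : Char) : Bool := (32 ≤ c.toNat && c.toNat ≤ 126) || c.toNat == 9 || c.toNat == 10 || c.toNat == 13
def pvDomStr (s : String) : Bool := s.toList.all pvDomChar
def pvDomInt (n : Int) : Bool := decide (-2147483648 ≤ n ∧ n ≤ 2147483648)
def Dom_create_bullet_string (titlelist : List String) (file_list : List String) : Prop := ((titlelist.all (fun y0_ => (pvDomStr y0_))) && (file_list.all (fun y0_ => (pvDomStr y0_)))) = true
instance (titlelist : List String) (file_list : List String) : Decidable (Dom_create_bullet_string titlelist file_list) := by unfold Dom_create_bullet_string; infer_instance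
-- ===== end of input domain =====

-- ===== PORT A =====
-- One honest line: B recursively consumes both lists head-first with a countdown
-- budget of 3 (no counter, no indexing), instead of A's enumerate loop with an
-- accumulator and a break on the 4th iteration; objective: alternative, same cost.
-- A-side loop: for counter, title in enumerate(titlelist): if counter >= 3: add marker, break; else add link via file_list[counter].
def pvA_loop (file_list : List String) : Nat → List String → String → String
  | _, [], acc => acc
  | counter, title :: rest, acc =>
    if counter ≥ 3 then acc ++ "- And more! \n"
    else pvA_loop file_list (counter + 1) rest
      (acc ++ "- [" ++ title ++ "](" ++ ((PySem.List.pyGet? file_list (counter : Int)).getD "") ++ ")\n")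

def create_bullet_string (titlelist : List String) (file_list : List String) : String :=
  pvA_loop file_list 0 titlelist ""

-- ===== PORT B =====
-- B-side recursion: go(titles, files, budget) with files[0] and files[1:].
def pvB_go : List String → List String → Nat → String
  | [], _, _ => ""
  | _ :: _, _, 0 => "- And more! \n"
  | title :: ts, files, Nat.succ b =>
    "- [" ++ title ++ "](" ++ ((PySem.List.pyGet? files (0 : Int)).getD "") ++ ")\n" ++
      pvB_go ts (files.drop 1) b

def create_bullet_string_alt (titlelist : List String) (file_list : List String) : String :=
  pvB_go titlelist file_list 3

-- ===== PRECONDITION & SPEC =====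
-- Pre_ excludes exactly the inputs where A raises IndexError (file_list shorter
-- than min(3, len(titlelist))); B raises IndexError there too.
def Pre_create_bullet_string (titlelist : List String) (file_list : List String) : Prop :=
  min 3 titlelist.length ≤ file_list.length
instance (titlelist : List String) (file_list : List String) : Decidable (Pre_create_bullet_string titlelist file_list) := by unfold Pre_create_bullet_string; infer_instance
def pvWitness_create_bullet_string : List String × List String :=
  (["a", "b", "c", "d"], ["f1", "f2", "f3"])
def Spec_create_bullet_string (titlelist : List String) (file_list : List String) (out : String) : Prop := out = create_bullet_string_alt titlelist file_list
instance (titlelist : List String) (file_list : List String) (out : String) : Decidable (Spec_create_bullet_string titlelist file_list out) := by unfold Spec_create_bullet_string; infer_instance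

-- ===== CLAIM (what is proved, stated in full; the proofs are below) =====
def Claim_equal_create_bullet_string : Prop := ∀ (titlelist : List String) (file_list : List String), Dom_create_bullet_string titlelist file_list → Pre_create_bullet_string titlelist file_list → Spec_create_bullet_string titlelist file_list (create_bullet_string titlelist file_list)

-- ===== LEMMAS AND PROOFS =====

-- ===== VERDICT (by name: the statement is the Claim_ definition above) =====
theorem create_bullet_string_spec : Claim_equal_create_bullet_string := by
  intro t f hd hp
  unfold Spec_create_bullet_string Pre_create_bullet_string at *
  match t, f with
  | [], f =>
      simp [create_bullet_string, create_bullet_string_alt, pvA_loop, pvB_go]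
  | [a], f0 :: fr =>
      rw [← String.toList_inj]
      simp [create_bullet_string, create_bullet_string_alt, pvA_loop, pvB_go]
  | [a, b], f0 :: f1 :: fr =>
      rw [← String.toList_inj]
      simp [create_bullet_string, create_bullet_string_alt, pvA_loop, pvB_go]
  | [a, b, c], f0 :: f1 :: f2 :: fr =>
      have gf1 : PySem.List.pyGet? (f0 :: f1 :: f2 :: fr) (1 : Int) = some f1 := by
        simp [PySem.List.pyGet?, PySem.List.pyIdx?]; split_ifs with h <;> first | rfl | omega
      have gf2 : PySem.List.pyGet? (f0 :: f1 :: f2 :: fr) (2 : Int) = some f2 := by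
        simp [PySem.List.pyGet?, PySem.List.pyIdx?]; split_ifs with h <;> first | rfl | omega
      rw [← String.toList_inj]
      simp [create_bullet_string, create_bullet_string_alt, pvA_loop, pvB_go, gf1, gf2]
  | a :: b :: c :: d :: rest, f0 :: f1 :: f2 :: fr =>
      have gf1 : PySem.List.pyGet? (f0 :: f1 :: f2 :: fr) (1 : Int) = some f1 := by
        simp [PySem.List.pyGet?, PySem.List.pyIdx?]; split_ifs with h <;> first | rfl | omega
      have gf2 : PySem.List.pyGet? (f0 :: f1 :: f2 :: fr) (2 : Int) = some f2 := by
        simp [PySem.List.pyGet?, PySem.List.pyIdx?]; split_ifs with h <;> first | rfl | omega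
      rw [← String.toList_inj]
      simp [create_bullet_string, create_bullet_string_alt, pvA_loop, pvB_go, gf1, gf2]
  | [a], [] => simp at hp
  | [a, b], [] => simp at hp
  | [a, b], [f0] => simp at hp
  | [a, b, c], [] => simp at hp
  | [a, b, c], [f0] => simp at hp
  | [a, b, c], [f0, f1] => simp at hp
  | a :: b :: c :: d :: rest, [] => simp at hp
  | a :: b :: c :: d :: rest, [f0] => simp at hp
  | a :: b :: c :: d :: rest, [f0, f1] => simp at hp
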